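-- pv_equiv track=rewrite | github.com/gmftbyGMFTBY/Rep-Dropout | repetition_dropout/custom_datasets/dataloader.py | gen_prev_index
-- ===== SOURCE A (Python) =====
-- def gen_prev_index(seq):
--     word_dict = dict()
--     prev_index = []
--     prev_index_mask = []
--     for idx in range(0, len(seq)):
--         w = seq[idx]
--         if w in word_dict:
--             prev_index.append(word_dict[w])
--             prev_index_mask.append(1)
--         else:
--             prev_index.append(0)
--             prev_index_mask.append(0)
--         word_dict[w] = idx
--     return prev_index, prev_index_mask
-- ===== SOURCE B (Python) =====
-- def gen_prev_index(seq):
--     # Phase 1: build a full occurrence index (element -> ordered list of positions).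
--     occ = {}
--     for i, w in enumerate(seq):
--         occ.setdefault(w, []).append(i)
--     # Phase 2: link every non-first occurrence to its predecessor position.
--     link = {}
--     for ps in occ.values():
--         for a, b in zip(ps, ps[1:]):
--             link[b] = a
--     n = len(seq)
--     prev_index = [link.get(i, 0) for i in range(n)]
--     prev_index_mask = [1 if i in link else 0 for i in range(n)]
--     return prev_index, prev_index_mask
-- ===== Notes on version B (the rewrite author's own statement) =====
-- stated objective: alternative
-- what changed: Instead of a single pass maintaining a last-seen-index dict and appending to the outputs as it goes, B first builds a complete occurrence index (element -> ordered list of positions), links each non-first occurrence to its predecessor by zipping consecutive positions, and finally reads both output lists off that link table by position.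
import Mathlib
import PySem

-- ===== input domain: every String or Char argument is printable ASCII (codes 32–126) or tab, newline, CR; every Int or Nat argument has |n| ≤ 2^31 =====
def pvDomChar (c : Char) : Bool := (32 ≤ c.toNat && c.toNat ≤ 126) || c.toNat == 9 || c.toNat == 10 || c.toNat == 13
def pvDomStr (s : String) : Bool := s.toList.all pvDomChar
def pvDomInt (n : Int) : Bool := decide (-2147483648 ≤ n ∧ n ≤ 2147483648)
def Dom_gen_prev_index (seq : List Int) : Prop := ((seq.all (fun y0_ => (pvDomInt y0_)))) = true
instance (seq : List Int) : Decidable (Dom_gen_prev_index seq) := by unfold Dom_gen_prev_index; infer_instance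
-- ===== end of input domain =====

-- B replaces A's single-pass last-seen dict by a two-phase occurrence index with a predecessor link table (alternative decomposition, same return value).

-- ===== PORT A =====
def gen_prev_index (seq : List Int) : List Int × List Int :=
  let r := (PySem.List.pyRange 0 (PySem.List.len seq) 1).foldl
    (fun (st : PySem.Dict Int Int × List Int × List Int) idx =>
      let w := PySem.List.pyGetD seq idx 0   -- seq[idx]: idx ∈ range(len(seq)) is always in range, so the default is never used
      if st.1.contains w then
        (st.1.insert w idx, st.2.1 ++ [st.1.getD w 0], st.2.2 ++ [1])
      else
        (st.1.insert w idx, st.2.1 ++ [0], st.2.2 ++ [0]))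
    (PySem.Dict.empty, [], [])
  (r.2.1, r.2.2)

-- ===== PORT B =====
-- occ.setdefault(w, []).append(i)  ==  occ[w] = occ.get(w, []) + [i]  ==  Dict.modify
def pvOcc (seq : List Int) : PySem.Dict Int (List Int) :=
  (PySem.List.enumerate seq 0).foldl (fun d p => d.modify p.2 [] (fun l => l ++ [p.1])) PySem.Dict.empty

def pvLink (seq : List Int) : PySem.Dict Int Int :=
  (pvOcc seq).values.foldl
    (fun d ps => (ps.zip (PySem.List.slice ps (some 1) none)).foldl (fun d ab => d.insert ab.2 ab.1) d)
    PySem.Dict.empty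

def gen_prev_index_alt (seq : List Int) : List Int × List Int :=
  ((PySem.List.pyRange 0 (PySem.List.len seq) 1).map (fun i => (pvLink seq).getD i 0),
   (PySem.List.pyRange 0 (PySem.List.len seq) 1).map (fun i => if (pvLink seq).contains i then (1 : Int) else 0))

-- ===== PRECONDITION & SPEC =====
def Spec_gen_prev_index (seq : List Int) (out : List Int × List Int) : Prop := out = gen_prev_index_alt seq
instance (seq : List Int) (out : List Int × List Int) : Decidable (Spec_gen_prev_index seq out) := by unfold Spec_gen_prev_index; infer_instance

-- ===== CLAIM (what is proved, stated in full; the proofs are below) =====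
def Claim_equal_gen_prev_index : Prop := ∀ (seq : List Int), Dom_gen_prev_index seq → Spec_gen_prev_index seq (gen_prev_index seq)

-- ===== LEMMAS AND PROOFS =====

def pvStepA (st : PySem.Dict Int Int × List Int × List Int) (p : Int × Int) :
    PySem.Dict Int Int × List Int × List Int :=
  if st.1.contains p.2 then
    (st.1.insert p.2 p.1, st.2.1 ++ [st.1.getD p.2 0], st.2.2 ++ [1])
  else
    (st.1.insert p.2 p.1, st.2.1 ++ [0], st.2.2 ++ [0])

-- positions of w in seq, in order
def pvPos (seq : List Int) (w : Int) : List Int :=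
  ((PySem.List.enumerate seq 0).filter (fun p => p.2 == w)).map Prod.fst

-- (non-first occurrence, its predecessor) pairs contributed by w's occurrence list
def pvPairs (seq : List Int) (w : Int) : List (Int × Int) :=
  ((pvPos seq w).zip (pvPos seq w).tail).map (fun ab => (ab.2, ab.1))

lemma bridgeA (seq : List Int) :
    gen_prev_index seq = ((PySem.List.enumerate seq 0).foldl pvStepA (PySem.Dict.empty, [], [])).2 := by
  unfold gen_prev_index
  rw [PySem.List.enumerate_eq_map_pyRange (d := 0), List.foldl_map]
  rfl

lemma occ_getD (seq : List Int) (w : Int) : (pvOcc seq).getD w [] = pvPos seq w := by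
  unfold pvOcc pvPos
  have h1 : (PySem.List.enumerate seq 0).foldl
        (fun d p => d.modify p.2 [] (fun l => l ++ [p.1])) PySem.Dict.empty
      = ((PySem.List.enumerate seq 0).map Prod.swap).foldl
        (fun d p => d.modify p.1 [] (fun l => l ++ [p.2])) PySem.Dict.empty := by
    rw [List.foldl_map]; rfl
  rw [h1, PySem.Dict.getD_foldl_modify_append]
  simp [List.filter_map, List.map_map, Function.comp_def, Prod.swap]

lemma occ_keys_nodup (seq : List Int) : (pvOcc seq).keys.Nodup := by
  unfold pvOcc
  apply PySem.Dict.nodup_keys_foldl_modify_key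
  simp

lemma occ_mem_keys (seq : List Int) (i w : Int) (h : (i, w) ∈ PySem.List.enumerate seq 0) :
    w ∈ (pvOcc seq).keys := by
  unfold pvOcc
  rw [PySem.Dict.keys_foldl_modify_key]
  have h1 : w ∈ (PySem.List.enumerate seq 0).map (fun p => p.2) := List.mem_map_of_mem h
  simpa [PySem.Set.mem_ofList] using h1

lemma pair_fst_eq : ∀ (l : List (Int × Int)), l.Pairwise (fun a b => a.1 < b.1) →
    ∀ p ∈ l, ∀ q ∈ l, p.1 = q.1 → p = q := by
  intro l hl
  induction l with
  | nil => simp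
  | cons a t ih =>
    obtain ⟨ha, ht⟩ := List.pairwise_cons.mp hl
    intro p hp q hq h
    rcases List.mem_cons.mp hp with rfl | hp' <;> rcases List.mem_cons.mp hq with rfl | hq'
    · rfl
    · exact absurd h (ne_of_lt (ha q hq'))
    · exact absurd h.symm (ne_of_lt (ha p hp'))
    · exact ih ht p hp' q hq' h

lemma entry_eq (seq : List Int) (p q : Int × Int)
    (hp : p ∈ PySem.List.enumerate seq 0) (hq : q ∈ PySem.List.enumerate seq 0)
    (h : p.1 = q.1) : p = q :=
  pair_fst_eq _ (PySem.List.pairwise_lt_enumerate seq 0) p hp q hq h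

lemma pos_pairwise (seq : List Int) (w : Int) : (pvPos seq w).Pairwise (· < ·) := by
  unfold pvPos
  rw [List.pairwise_map]
  exact (PySem.List.pairwise_lt_enumerate seq 0).filter _

lemma mem_pos (seq : List Int) (w x : Int) :
    x ∈ pvPos seq w ↔ (x, w) ∈ PySem.List.enumerate seq 0 := by
  unfold pvPos
  simp only [List.mem_map, List.mem_filter, beq_iff_eq]
  constructor
  · rintro ⟨p, ⟨hp, h2⟩, h1⟩
    have : p = (x, w) := by cases p; simp_all
    rwa [this] at hp
  · intro h
    exact ⟨(x, w), ⟨h, rfl⟩, rfl⟩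

lemma pos_disjoint (seq : List Int) (w w' x : Int) (hne : w ≠ w')
    (h : x ∈ pvPos seq w) : x ∉ pvPos seq w' := by
  intro h'
  rw [mem_pos] at h h'
  exact hne (congrArg Prod.snd (entry_eq seq _ _ h h' rfl))

lemma linkFold (seq : List Int) :
    ∀ (ws : List Int) (d : PySem.Dict Int Int),
      d.keys.Nodup →
      ws.Nodup →
      (∀ w ∈ ws, ∀ k ∈ d.keys, k ∉ pvPos seq w) →
      ((ws.map (fun w => pvPos seq w)).foldl
          (fun d ps => (ps.zip ps.tail).foldl (fun d ab => d.insert ab.2 ab.1) d) d).items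
        = d.items ++ (ws.map (fun w => pvPairs seq w)).flatten
      ∧ ((ws.map (fun w => pvPos seq w)).foldl
          (fun d ps => (ps.zip ps.tail).foldl (fun d ab => d.insert ab.2 ab.1) d) d).keys.Nodup := by
  intro ws
  induction ws with
  | nil => intro d h1 _ _; exact ⟨by simp, h1⟩
  | cons w ws' ih =>
    intro d hnd hws hfresh
    simp only [List.map_cons, List.foldl_cons]
    have hzip_snd : ((pvPos seq w).zip (pvPos seq w).tail).map Prod.snd = (pvPos seq w).tail :=
      List.map_snd_zip (by cases pvPos seq w <;> simp)
    have htail_nodup : (pvPos seq w).tail.Nodup :=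
      ((pos_pairwise seq w).imp (fun h => ne_of_lt h)).tail
    have hfresh_w : ∀ a ∈ (pvPos seq w).zip (pvPos seq w).tail, d.contains a.2 = false := by
      intro a ha
      have h2 : a.2 ∈ (pvPos seq w).tail := by
        rw [← hzip_snd]; exact List.mem_map_of_mem ha
      have h3 : a.2 ∈ pvPos seq w := List.mem_of_mem_tail h2
      rw [PySem.Dict.contains_eq_decide_mem_keys]
      simp only [decide_eq_false_iff_not]
      intro hk
      exact hfresh w List.mem_cons_self a.2 hk h3
    have hitems' : ((( pvPos seq w).zip (pvPos seq w).tail).foldl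
          (fun d ab => d.insert ab.2 ab.1) d).items = d.items ++ pvPairs seq w := by
      have h := PySem.Dict.items_foldl_insert_fresh
        ((pvPos seq w).zip (pvPos seq w).tail) Prod.snd Prod.fst d hfresh_w
        (by rw [hzip_snd]; exact htail_nodup)
      simpa [pvPairs] using h
    have hkeys' : ((( pvPos seq w).zip (pvPos seq w).tail).foldl
          (fun d ab => d.insert ab.2 ab.1) d).keys = d.keys ++ (pvPos seq w).tail := by
      show _root_.List.map Prod.fst _ = _
      rw [hitems', List.map_append]
      congr 1
      unfold pvPairs
      rw [List.map_map]
      simpa [Function.comp_def] using hzip_snd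
    have hdisj : ∀ k ∈ d.keys, k ∉ (pvPos seq w).tail := by
      intro k hk hmem
      exact hfresh w List.mem_cons_self k hk (List.mem_of_mem_tail hmem)
    have hnd' : ((( pvPos seq w).zip (pvPos seq w).tail).foldl
          (fun d ab => d.insert ab.2 ab.1) d).keys.Nodup := by
      rw [hkeys']
      exact List.Nodup.append hnd htail_nodup (fun a ha hb => hdisj a ha hb)
    have hfresh' : ∀ w' ∈ ws', ∀ k ∈ ((( pvPos seq w).zip (pvPos seq w).tail).foldl
          (fun d ab => d.insert ab.2 ab.1) d).keys, k ∉ pvPos seq w' := by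
      intro w' hw' k hk
      rw [hkeys'] at hk
      rcases List.mem_append.mp hk with hmem | hmem
      · exact hfresh w' (List.mem_cons_of_mem _ hw') k hmem
      · have hkpos : k ∈ pvPos seq w := List.mem_of_mem_tail hmem
        have hne : w ≠ w' := by rintro rfl; exact (List.nodup_cons.mp hws).1 hw'
        exact pos_disjoint seq w w' k hne hkpos
    obtain ⟨h1, h2⟩ := ih _ hnd' (List.nodup_cons.mp hws).2 hfresh'
    refine ⟨?_, h2⟩
    rw [h1, hitems']
    simp

lemma link_items (seq : List Int) :
    (pvLink seq).items = ((pvOcc seq).keys.map (fun w => pvPairs seq w)).flatten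
      ∧ (pvLink seq).keys.Nodup := by
  unfold pvLink
  rw [PySem.Dict.values_eq_map_keys (pvOcc seq) (occ_keys_nodup seq) []]
  have hfn : (fun k => (pvOcc seq).getD k []) = fun k => pvPos seq k :=
    funext (occ_getD seq)
  rw [hfn]
  simp only [PySem.List.slice_from_one]
  have h := linkFold seq (pvOcc seq).keys PySem.Dict.empty (by simp) (occ_keys_nodup seq)
    (by intro w _ k hk; simp at hk)
  exact ⟨by rw [h.1]; rfl, h.2⟩

lemma consec_mem : ∀ (L : List Int) (hL : L ≠ []) (i : Int) (R : List Int),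
    (L.getLast hL, i) ∈ (L ++ i :: R).zip (L ++ i :: R).tail := by
  intro L
  induction L with
  | nil => intro h; exact absurd rfl h
  | cons a L' ih =>
    intro hL i R
    cases L' with
    | nil => simp
    | cons b L'' =>
      have h2 : (b :: L'') ≠ [] := by simp
      have hmem := ih h2 i R
      rw [List.getLast_cons h2]
      simp only [List.cons_append, List.tail_cons, List.zip_cons_cons]
      exact List.mem_cons_of_mem _ (by simpa using hmem)

lemma link_get? (seq : List Int) (E₁ E₂ : List (Int × Int)) (i w : Int)
    (hE : PySem.List.enumerate seq 0 = E₁ ++ (i, w) :: E₂) :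
    (pvLink seq).get? i = ((E₁.filter (fun p => p.2 == w)).map Prod.fst).getLast? := by
  obtain ⟨hitems, hnodup⟩ := link_items seq
  set L : List Int := (E₁.filter (fun p => p.2 == w)).map Prod.fst with hLdef
  set R : List Int := (E₂.filter (fun p => p.2 == w)).map Prod.fst with hRdef
  have hpos : pvPos seq w = L ++ i :: R := by
    unfold pvPos
    rw [hE]
    simp [List.filter_append]
    rw [← hLdef, ← hRdef]
  have pairs_fst : ∀ w' : Int, (pvPairs seq w').map Prod.fst = (pvPos seq w').tail := by
    intro w'
    unfold pvPairs
    rw [List.map_map]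
    have hz : ((pvPos seq w').zip (pvPos seq w').tail).map Prod.snd = (pvPos seq w').tail :=
      List.map_snd_zip (by cases pvPos seq w' <;> simp)
    simpa [Function.comp_def] using hz
  have hkeys : (pvLink seq).keys = ((pvOcc seq).keys.map (fun w' => (pvPos seq w').tail)).flatten := by
    show _root_.List.map Prod.fst (pvLink seq).items = _
    rw [hitems, List.map_flatten, List.map_map]
    congr 1
    exact List.map_congr_left (fun w' _ => pairs_fst w')
  by_cases hL : L = []
  · have hnone : (pvLink seq).get? i = none := by
      rw [PySem.Dict.get?_eq_none_iff_not_mem_keys, hkeys]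
      intro hmem
      simp only [List.mem_flatten, List.mem_map] at hmem
      obtain ⟨_, ⟨w', hw', rfl⟩, hi⟩ := hmem
      have hiw' : i ∈ pvPos seq w' := List.mem_of_mem_tail hi
      have hiw : i ∈ pvPos seq w := by rw [hpos]; simp
      by_cases hww : w' = w
      · subst hww
        rw [hpos, hL] at hi
        simp only [List.nil_append, List.tail_cons] at hi
        have hp := pos_pairwise seq w'
        rw [hpos, hL, List.nil_append, List.pairwise_cons] at hp
        exact lt_irrefl i (hp.1 i hi)
      · exact pos_disjoint seq w w' i (fun hcontra => hww hcontra.symm) hiw hiw'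
    rw [hnone, hL]
    rfl
  · have hmemp : (L.getLast hL, i) ∈ (pvPos seq w).zip (pvPos seq w).tail := by
      rw [hpos]; exact consec_mem L hL i R
    have hpair : (i, L.getLast hL) ∈ pvPairs seq w := by
      unfold pvPairs
      exact List.mem_map_of_mem hmemp
    have hwk : w ∈ (pvOcc seq).keys := occ_mem_keys seq i w (by rw [hE]; simp)
    have hmem : (i, L.getLast hL) ∈ (pvLink seq).items := by
      rw [hitems]
      exact List.mem_flatten.mpr ⟨pvPairs seq w, List.mem_map_of_mem hwk, hpair⟩
    rw [PySem.Dict.get?_of_mem_items _ hmem hnodup, List.getLast?_eq_some_getLast (h := hL)]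

lemma core (seq : List Int) :
    ∀ (E₂ E₁ : List (Int × Int)) (d : PySem.Dict Int Int) (p1 p2 : List Int),
      PySem.List.enumerate seq 0 = E₁ ++ E₂ →
      (∀ w : Int, d.get? w = (((E₁.filter (fun p => p.2 == w)).map Prod.fst).getLast?)) →
      (E₂.foldl pvStepA (d, p1, p2)).2
        = (p1 ++ E₂.map (fun p => (pvLink seq).getD p.1 0),
           p2 ++ E₂.map (fun p => if (pvLink seq).contains p.1 then (1 : Int) else 0)) := by
  intro E₂
  induction E₂ with
  | nil => intro E₁ d p1 p2 hE hinv; simp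
  | cons p E₂' ih =>
    intro E₁ d p1 p2 hE hinv
    obtain ⟨i, w⟩ := p
    set L : List Int := (E₁.filter (fun p => p.2 == w)).map Prod.fst with hLdef
    have hlink : (pvLink seq).get? i = L.getLast? := link_get? seq E₁ E₂' i w hE
    have hinv' : ∀ w' : Int, (d.insert w i).get? w'
        = ((((E₁ ++ [(i, w)]).filter (fun p => p.2 == w')).map Prod.fst).getLast?) := by
      intro w'
      by_cases hww : w' = w
      · subst hww
        rw [PySem.Dict.get?_insert_self]
        simp [List.filter_append]
      · rw [PySem.Dict.get?_insert_of_ne (hne := hww), hinv w']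
        have hne : (w == w') = false := by simp [Ne.symm hww]
        simp [List.filter_append, hne]
    have hE' : PySem.List.enumerate seq 0 = (E₁ ++ [(i, w)]) ++ E₂' := by
      rw [hE]; simp
    have hcont : (pvLink seq).contains i = d.contains w := by
      rw [PySem.Dict.contains_eq_isSome_get?, PySem.Dict.contains_eq_isSome_get?,
        hlink, hinv w]
    have hval : (pvLink seq).getD i 0 = d.getD w 0 := by
      rw [PySem.Dict.getD_eq_get?_getD, PySem.Dict.getD_eq_get?_getD, hlink, hinv w]
    simp only [List.foldl_cons, List.map_cons]
    by_cases hc : d.contains w = true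
    · have hA : pvStepA (d, p1, p2) (i, w) = (d.insert w i, p1 ++ [d.getD w 0], p2 ++ [1]) := by
        simp [pvStepA, hc]
      rw [hA, ih (E₁ ++ [(i, w)]) (d.insert w i) _ _ hE' hinv', ← hval, hcont, if_pos hc]
      simp
    · have hcf : d.contains w = false := by simpa using hc
      have hA : pvStepA (d, p1, p2) (i, w) = (d.insert w i, p1 ++ [0], p2 ++ [0]) := by
        simp [pvStepA, hcf]
      rw [hA, ih (E₁ ++ [(i, w)]) (d.insert w i) _ _ hE' hinv']
      have hnone : (pvLink seq).get? i = none := by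
        rw [hlink, ← hinv w, PySem.Dict.get?_eq_none_iff_contains]
        exact hcf
      have : (pvLink seq).getD i 0 = 0 := PySem.Dict.getD_of_get?_eq_none _ _ hnone
      rw [this, hcont, if_neg hc]
      simp

-- ===== VERDICT (by name: the statement is the Claim_ definition above) =====
theorem gen_prev_index_spec : Claim_equal_gen_prev_index := by
  intro seq _
  unfold Spec_gen_prev_index
  rw [bridgeA, core seq (PySem.List.enumerate seq 0) [] PySem.Dict.empty [] []
    (by simp) (fun w => by simp [PySem.Dict.get?_empty])]
  unfold gen_prev_index_alt
  rw [PySem.List.enumerate_eq_map_pyRange (d := 0), List.map_map, List.map_map]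
  simp [Function.comp_def]
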